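-- pv_equiv track=rewrite | github.com/PrincessCodePath/applied-ai-system-project | logic_utils.py | repetition_note
-- ===== SOURCE A (Python) =====
-- def repetition_note(guess_history, last_outcome):
--     ints = [g for g in guess_history if isinstance(g, int)]
--     if len(ints) < 3:
--         return ""
--     recent = ints[-3:]
--     if len(set(recent)) == 1:
--         return "You’ve guessed the same number multiple times. Try something different."
--     if last_outcome == "Too Low" and max(recent) <= min(recent):
--         return ""
--     if last_outcome == "Too Low" and recent[-1] <= recent[-2] <= recent[-3]:
--         return "You keep guessing low after a 'go higher' hint. Increase your guess more."
--     if last_outcome == "Too High" and recent[-1] >= recent[-2] >= recent[-3]: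
--         return "You keep guessing high after a 'go lower' hint. Decrease your guess more."
--     return ""
-- ===== SOURCE B (Python) =====
-- def repetition_note(guess_history, last_outcome):
--     # Streaming pass: maintain run lengths of equal / non-increasing /
--     # non-decreasing runs ending at the most recent int. No buffer of the
--     # last three values is ever materialised; the verdict is read off the
--     # run lengths at the end.
--     n = 0
--     eq = dn = up = 0
--     prev = None
--     for g in guess_history:
--         if isinstance(g, int):
--             if n == 0:
--                 eq = dn = up = 1
--             else:
--                 eq = eq + 1 if g == prev else 1
--                 dn = dn + 1 if g <= prev else 1
--                 up = up + 1 if g >= prev else 1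
--             n += 1
--             prev = g
--     if n < 3:
--         return ""
--     if eq >= 3:
--         return "You’ve guessed the same number multiple times. Try something different."
--     if last_outcome == "Too Low" and dn >= 3:
--         return "You keep guessing low after a 'go higher' hint. Increase your guess more."
--     if last_outcome == "Too High" and up >= 3:
--         return "You keep guessing high after a 'go lower' hint. Decrease your guess more."
--     return ""
-- ===== Notes on version B (the rewrite author's own statement) =====
-- stated objective: alternative
-- what changed: Replaces filter + last-three slice + set/min/max/index comparisons by a single streaming pass that maintains run lengths of equal, non-increasing and non-decreasing runs ending at the latest int, reading the verdict off 'run length >= 3' at the end; the dead 'Too Low and max<=min' branch (subsumed by the all-equal check) disappears.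
import Mathlib
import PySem

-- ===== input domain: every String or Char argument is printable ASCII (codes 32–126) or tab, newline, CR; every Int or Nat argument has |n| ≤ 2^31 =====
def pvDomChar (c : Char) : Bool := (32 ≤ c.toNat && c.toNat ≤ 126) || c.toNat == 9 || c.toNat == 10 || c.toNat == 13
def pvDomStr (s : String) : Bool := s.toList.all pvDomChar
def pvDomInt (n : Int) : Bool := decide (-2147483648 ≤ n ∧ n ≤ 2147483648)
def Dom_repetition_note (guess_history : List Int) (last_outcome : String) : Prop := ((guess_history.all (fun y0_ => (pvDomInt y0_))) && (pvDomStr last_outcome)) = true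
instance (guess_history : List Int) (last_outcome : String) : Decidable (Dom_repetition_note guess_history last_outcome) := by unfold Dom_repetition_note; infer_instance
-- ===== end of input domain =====

-- B replaces the filter + last-three slice + set/min/max machinery by a single streaming
-- pass over the history maintaining run lengths (equal / non-increasing / non-decreasing)
-- ending at the latest int; same return values (objective: alternative decomposition).


-- ===== PORT A =====
def repetition_note (guess_history : List Int) (last_outcome : String) : String :=
  -- isinstance(g, int) is always true under the List Int typing
  let ints := guess_history.filter (fun _ => true)
  if ints.length < 3 then ""
  else
    let recent := PySem.List.slice ints (some (-3)) none
    if (PySem.Set.ofList recent).length = 1 then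
      "You’ve guessed the same number multiple times. Try something different."
    -- max(recent)/min(recent)/recent[-k] never raise here (recent has length 3);
    -- the .getD 0 / default 0 are unreachable
    else if last_outcome = "Too Low" ∧
        (PySem.List.max? recent (fun x => x)).getD 0 ≤ (PySem.List.min? recent (fun x => x)).getD 0 then
      ""
    else if last_outcome = "Too Low" ∧
        PySem.List.pyGetD recent (-1) 0 ≤ PySem.List.pyGetD recent (-2) 0 ∧
        PySem.List.pyGetD recent (-2) 0 ≤ PySem.List.pyGetD recent (-3) 0 then
      "You keep guessing low after a 'go higher' hint. Increase your guess more."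
    else if last_outcome = "Too High" ∧
        PySem.List.pyGetD recent (-1) 0 ≥ PySem.List.pyGetD recent (-2) 0 ∧
        PySem.List.pyGetD recent (-2) 0 ≥ PySem.List.pyGetD recent (-3) 0 then
      "You keep guessing high after a 'go lower' hint. Decrease your guess more."
    else ""

-- ===== PORT B =====
-- streaming state (n, prev, eq, dn, up): count of ints seen, last int, and the
-- lengths of the equal / non-increasing / non-decreasing runs ending at it.
-- Python's 'prev = None' start is represented by the n = 0 test (prev unread there).
def rnStep (st : Int × Int × Int × Int × Int) (g : Int) : Int × Int × Int × Int × Int :=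
  match st with
  | (n, prev, eq, dn, up) =>
    if n = 0 then (1, g, 1, 1, 1)
    else (n + 1, g,
          if g = prev then eq + 1 else 1,
          if g ≤ prev then dn + 1 else 1,
          if g ≥ prev then up + 1 else 1)

def repetition_note_alt (guess_history : List Int) (last_outcome : String) : String :=
  match guess_history.foldl rnStep (0, 0, 0, 0, 0) with
  | (n, _, eq, dn, up) =>
    if n < 3 then ""
    else if eq ≥ 3 then
      "You’ve guessed the same number multiple times. Try something different."
    else if last_outcome = "Too Low" ∧ dn ≥ 3 then
      "You keep guessing low after a 'go higher' hint. Increase your guess more."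
    else if last_outcome = "Too High" ∧ up ≥ 3 then
      "You keep guessing high after a 'go lower' hint. Decrease your guess more."
    else ""

-- ===== PRECONDITION & SPEC =====
def Spec_repetition_note (guess_history : List Int) (last_outcome : String) (out : String) : Prop := out = repetition_note_alt guess_history last_outcome
instance (guess_history : List Int) (last_outcome : String) (out : String) : Decidable (Spec_repetition_note guess_history last_outcome out) := by unfold Spec_repetition_note; infer_instance

-- ===== CLAIM (what is proved, stated in full; the proofs are below) =====
def Claim_equal_repetition_note : Prop := ∀ (guess_history : List Int) (last_outcome : String), Dom_repetition_note guess_history last_outcome → Spec_repetition_note guess_history last_outcome (repetition_note guess_history last_outcome)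

-- ===== LEMMAS AND PROOFS =====

lemma set_three_len_one (x y z : Int) :
    (PySem.Set.ofList [x, y, z]).length = 1 ↔ x = y ∧ y = z := by
  by_cases hxy : y = x
  · subst hxy
    by_cases hzx : z = y <;>
      simp [PySem.Set.ofList, PySem.Set.add, PySem.Set.contains, List.foldl, hzx] <;> omega
  · by_cases hzx : z = x <;> by_cases hzy : z = y <;>
      simp [PySem.Set.ofList, PySem.Set.add, PySem.Set.contains, List.foldl, hxy, hzx, hzy] <;>
      exact fun h => absurd h.symm hxy

-- after processing front ++ [x], the streaming state carries prev = x,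
-- n = front.length + 1, and all three run lengths at least 1
lemma rnScan_last (front : List Int) (x : Int) :
    ∃ e d u, (front ++ [x]).foldl rnStep (0, 0, 0, 0, 0)
      = ((front.length : Int) + 1, x, e, d, u) ∧ 1 ≤ e ∧ 1 ≤ d ∧ 1 ≤ u := by
  induction front using List.reverseRecOn generalizing x with
  | nil => exact ⟨1, 1, 1, by simp [rnStep], by omega, by omega, by omega⟩
  | append_singleton fr y ih =>
      obtain ⟨e, d, u, heq, he, hd, hu⟩ := ih y
      refine ⟨if x = y then e + 1 else 1, if x ≤ y then d + 1 else 1,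
              if x ≥ y then u + 1 else 1, ?_, ?_, ?_, ?_⟩
      · rw [List.foldl_append, heq]
        have hn : ((fr.length : Int) + 1) ≠ 0 := by positivity
        simp only [List.foldl, rnStep, if_neg hn]
        simp
      · split <;> omega
      · split <;> omega
      · split <;> omega

lemma core_eq (x y z : Int) (lo : String) (rest : List Int) :
    repetition_note (rest.reverse ++ [x, y, z]) lo =
    repetition_note_alt (rest.reverse ++ [x, y, z]) lo := by
  have hlen : (rest.reverse ++ [x, y, z]).length = rest.length + 3 := by simp
  have hslice : PySem.List.slice (rest.reverse ++ [x, y, z]) (some (-3)) none = [x, y, z] := by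
    rw [PySem.List.slice_from_neg_ofNat _ 3 (by omega)]
    simp [hlen]
  -- compute B's final streaming state
  obtain ⟨e, d, u, hfold, he, hd, hu⟩ := rnScan_last rest.reverse x
  have hsplit : rest.reverse ++ [x, y, z] = ((rest.reverse ++ [x]) ++ [y]) ++ [z] := by simp
  have hB : (rest.reverse ++ [x, y, z]).foldl rnStep (0, 0, 0, 0, 0)
      = ((rest.length : Int) + 3, z,
         if z = y then (if y = x then e + 1 else 1) + 1 else 1,
         if z ≤ y then (if y ≤ x then d + 1 else 1) + 1 else 1,
         if z ≥ y then (if y ≥ x then u + 1 else 1) + 1 else 1) := by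
    rw [hsplit, List.foldl_append, List.foldl_append, hfold]
    have hn1 : ((rest.reverse.length : Int) + 1) ≠ 0 := by positivity
    have hn2 : ((rest.reverse.length : Int) + 1 + 1) ≠ 0 := by positivity
    simp only [List.foldl, rnStep, if_neg hn1, if_neg hn2]
    simp
    ring_nf
  unfold repetition_note repetition_note_alt
  rw [hB]
  simp only [List.filter_true, hlen, hslice]
  have h1 : ¬ (rest.length + 3 < 3) := by omega
  have h1' : ¬ ((rest.length : Int) + 3 < 3) := by omega
  rw [if_neg h1, if_neg h1']
  have hmax : (PySem.List.max? [x, y, z] (fun v => v)).getD 0 = max (max x y) z := by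
    rw [PySem.List.max?_id_cons]; simp [List.foldl]
  have hmin : (PySem.List.min? [x, y, z] (fun v => v)).getD 0 = min (min x y) z := by
    rw [PySem.List.min?_id_cons]; simp [List.foldl]
  have g1 : PySem.List.pyGetD [x, y, z] (-1) 0 = z := by
    rw [PySem.List.pyGetD_neg_ofNat _ 1 0 (by omega) (by simp)]; rfl
  have g2 : PySem.List.pyGetD [x, y, z] (-2) 0 = y := by
    rw [PySem.List.pyGetD_neg_ofNat _ 2 0 (by omega) (by simp)]; rfl
  have g3 : PySem.List.pyGetD [x, y, z] (-3) 0 = x := by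
    rw [PySem.List.pyGetD_neg_ofNat _ 3 0 (by omega) (by simp)]; rfl
  rw [hmax, hmin, g1, g2, g3]
  have heqiff : ((if z = y then (if y = x then e + 1 else 1) + 1 else 1) ≥ 3) ↔ (x = y ∧ y = z) := by
    by_cases h1 : z = y <;> by_cases h2 : y = x <;> simp [h1, h2] <;> omega
  have hdniff : (lo = "Too Low" ∧ (if z ≤ y then (if y ≤ x then d + 1 else 1) + 1 else 1) ≥ 3)
      ↔ (lo = "Too Low" ∧ z ≤ y ∧ y ≤ x) := by
    by_cases h1 : z ≤ y <;> by_cases h2 : y ≤ x <;> simp [h1, h2] <;> omega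
  have hupiff : (lo = "Too High" ∧ (if z ≥ y then (if y ≥ x then u + 1 else 1) + 1 else 1) ≥ 3)
      ↔ (lo = "Too High" ∧ z ≥ y ∧ y ≥ x) := by
    by_cases h1 : z ≥ y <;> by_cases h2 : y ≥ x <;> simp [h1, h2] <;> omega
  simp only [set_three_len_one, heqiff, hdniff, hupiff]
  by_cases hall : x = y ∧ y = z
  · obtain ⟨rfl, rfl⟩ := hall
    simp
  · simp [hall]
    intro _ h2 _ h4 h5 _ h7
    exact absurd ⟨le_antisymm h4 h2, le_antisymm h7 h5⟩ hall

theorem main_eq (gh : List Int) (lo : String) :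
    repetition_note gh lo = repetition_note_alt gh lo := by
  match h : gh.reverse with
  | [] =>
      have : gh = [] := by simpa using congrArg List.reverse h
      subst this; rfl
  | [a] =>
      have : gh = [a] := by simpa using congrArg List.reverse h
      subst this; rfl
  | [a, b] =>
      have : gh = [b, a] := by
        have := congrArg List.reverse h; simpa using this
      subst this; rfl
  | z :: y :: x :: rest =>
      have hg : gh = rest.reverse ++ [x, y, z] := by
        have := congrArg List.reverse h
        simpa using this
      rw [hg]; exact core_eq x y z lo rest

-- ===== VERDICT (by name: the statement is the Claim_ definition above) =====
theorem repetition_note_spec : Claim_equal_repetition_note := by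
  intro gh lo _
  unfold Spec_repetition_note
  exact main_eq gh lo
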